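-- pv_equiv track=rewrite | github.com/vivekbhogadi369-glitch/pastpulse-telegram-bot | main.py | split_telegram_chunks
-- ===== SOURCE A (Python) =====
-- from typing import List, Optional, Tuple
--
-- def split_telegram_chunks(text: str, limit: int = 3900) -> List[str]:
--     """
--     Telegram hard limit ~4096. Use 3900 to be safe.
--     Splits on paragraph boundaries where possible.
--     """
--     if len(text) <= limit:
--         return [text]
--
--     parts = []
--     remaining = text
--     while len(remaining) > limit:
--         cut = remaining.rfind("\n\n", 0, limit)
--         if cut == -1 or cut < 800:
--             cut = remaining.rfind("\n", 0, limit)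
--         if cut == -1 or cut < 800:
--             cut = limit
--         parts.append(remaining[:cut].rstrip())
--         remaining = remaining[cut:].lstrip()
--     if remaining:
--         parts.append(remaining)
--     return parts
-- ===== SOURCE B (Python) =====
-- from typing import List
--
-- def split_telegram_chunks(text: str, limit: int = 3900) -> List[str]:
--     """Single index pointer over the original string; bounded rfind, no repeated
--     slicing of the remainder (each character is copied at most once)."""
--     n = len(text)
--     if n <= limit:
--         return [text]
--     parts = []
--     i = 0
--     while n - i > limit:
--         j = text.rfind("\n\n", i, i + limit)
--         if j == -1 or j - i < 800:
--             j = text.rfind("\n", i, i + limit)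
--         if j == -1 or j - i < 800:
--             j = i + limit
--         e = j
--         while e > i and text[e - 1].isspace():
--             e -= 1
--         parts.append(text[i:e])
--         i = j
--         while i < n and text[i].isspace():
--             i += 1
--     if i < n:
--         parts.append(text[i:])
--     return parts
-- ===== Notes on version B (the rewrite author's own statement) =====
-- stated objective: faster
-- what changed: B replaces A's repeated re-slicing of the whole remainder (remaining = remaining[cut:].lstrip() each iteration) with a single index pointer into the original string, bounded rfind calls with absolute start/end, a backward whitespace scan instead of rstrip-on-a-copy, so each character is touched O(1) times.
-- outside the precondition, e.g. on split_telegram_chunks('  ', 0): A returns [''], B returns ['']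
import Mathlib
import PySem

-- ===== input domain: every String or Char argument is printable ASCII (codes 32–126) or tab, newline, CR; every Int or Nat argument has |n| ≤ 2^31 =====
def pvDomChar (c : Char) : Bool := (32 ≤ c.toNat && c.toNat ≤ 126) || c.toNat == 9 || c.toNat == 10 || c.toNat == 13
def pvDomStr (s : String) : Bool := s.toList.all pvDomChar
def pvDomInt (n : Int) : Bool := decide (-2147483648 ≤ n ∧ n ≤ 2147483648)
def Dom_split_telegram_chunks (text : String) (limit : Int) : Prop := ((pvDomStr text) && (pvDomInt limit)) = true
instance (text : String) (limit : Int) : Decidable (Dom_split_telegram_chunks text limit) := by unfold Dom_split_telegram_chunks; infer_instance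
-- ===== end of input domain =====

-- B rewrites A's chunking loop with an index pointer over the original string (bounded rfind,
-- no repeated slicing of the remainder); the return values agree for every positive limit.

-- ===== PORT A =====
-- while len(remaining) > limit: … (fuel = |text|+1 is a totality guard only; under Pre_ each
-- iteration removes at least one character, so the fuel is never exhausted)
def pvALoop (limit : Int) : Nat → List Char → List (List Char) → List (List Char) × List Char
  | 0, remaining, parts => (parts, remaining)
  | fuel + 1, remaining, parts =>
    if (remaining.length : Int) > limit then
      let cut0 := PySem.Chars.rfindFrom remaining ['\n', '\n'] 0 (some limit)
      let cut1 := if cut0 = -1 ∨ cut0 < 800 then PySem.Chars.rfindFrom remaining ['\n'] 0 (some limit) else cut0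
      let cut : Int := if cut1 = -1 ∨ cut1 < 800 then limit else cut1
      pvALoop limit fuel
        (PySem.Chars.lstrip (PySem.List.slice remaining (some cut) none))
        (parts ++ [PySem.Chars.rstrip (PySem.List.slice remaining none (some cut))])
    else (parts, remaining)

def split_telegram_chunks (text : String) (limit : Int) : List String :=
  let cs := text.toList
  if (cs.length : Int) ≤ limit then [text]
  else
    let pr := pvALoop limit (cs.length + 1) cs []
    (if pr.2.isEmpty then pr.1 else pr.1 ++ [pr.2]).map (fun l => String.ofList l)

-- ===== PORT B =====
-- while i < n and text[i].isspace(): i += 1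
def pvSkipWS (cs : List Char) (i : Nat) : Nat :=
  if h : i < cs.length then
    if PySem.Chars.isspace cs[i] then pvSkipWS cs (i + 1) else i
  else i
termination_by cs.length - i
decreasing_by omega

-- e = j; while e > i and text[e-1].isspace(): e -= 1   (the .getD 'x' default is a totality
-- guard: under Pre_ the loop only reads indices < len(text))
def pvTrimEnd (cs : List Char) (i : Nat) (e : Nat) : Nat :=
  if h : i < e ∧ PySem.Chars.isspace ((cs[e - 1]?).getD 'x') then pvTrimEnd cs i (e - 1) else e
termination_by e
decreasing_by omega

-- while n - i > limit: …  (same fuel-only totality guard as in port A)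
def pvBLoop (cs : List Char) (limit : Int) : Nat → Nat → List (List Char) → List (List Char) × Nat
  | 0, i, parts => (parts, i)
  | fuel + 1, i, parts =>
    if (cs.length : Int) - i > limit then
      let j0 := PySem.Chars.rfindFrom cs ['\n', '\n'] i (some ((i : Int) + limit))
      let j1 := if j0 = -1 ∨ j0 - i < 800 then PySem.Chars.rfindFrom cs ['\n'] i (some ((i : Int) + limit)) else j0
      let j : Nat := (if j1 = -1 ∨ j1 - i < 800 then (i : Int) + limit else j1).toNat
      let e := pvTrimEnd cs i j
      pvBLoop cs limit fuel (pvSkipWS cs j)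
        (parts ++ [PySem.List.slice cs (some (i : Int)) (some (e : Int))])
    else (parts, i)

def split_telegram_chunks_alt (text : String) (limit : Int) : List String :=
  let cs := text.toList
  if (cs.length : Int) ≤ limit then [text]
  else
    let pr := pvBLoop cs limit (cs.length + 1) 0 []
    (if pr.2 < cs.length then pr.1 ++ [PySem.List.slice cs (some (pr.2 : Int)) none] else pr.1).map
      (fun l => String.ofList l)

-- ===== PRECONDITION & SPEC =====
-- Pre_ excludes non-positive limits: there the Python A (and the natural B) loops forever on
-- almost every text (a degenerate exception: on all-whitespace text with limit = 0 A happens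
-- to return ['']); the equality claim is about the inputs on which A terminates.
def Pre_split_telegram_chunks (_text : String) (limit : Int) : Prop := 1 ≤ limit
instance (text : String) (limit : Int) : Decidable (Pre_split_telegram_chunks text limit) := by
  unfold Pre_split_telegram_chunks; infer_instance

def pvWitness_split_telegram_chunks : String × Int := ("a\n\nb", 2)

def Spec_split_telegram_chunks (text : String) (limit : Int) (out : List String) : Prop := out = split_telegram_chunks_alt text limit
instance (text : String) (limit : Int) (out : List String) : Decidable (Spec_split_telegram_chunks text limit out) := by unfold Spec_split_telegram_chunks; infer_instance

-- ===== CLAIM (what is proved, stated in full; the proofs are below) =====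
def Claim_equal_split_telegram_chunks : Prop := ∀ (text : String) (limit : Int), Dom_split_telegram_chunks text limit → Pre_split_telegram_chunks text limit → Spec_split_telegram_chunks text limit (split_telegram_chunks text limit)

-- ===== LEMMAS AND PROOFS =====

lemma pv_rfind_go_le (s sub : List Char) (j : Nat) : PySem.Chars.rfind.go s sub j ≤ (j : Int) := by
  induction j with
  | zero => simp [PySem.Chars.rfind.go]; split <;> simp
  | succ k ih =>
    rw [PySem.Chars.rfind.go]
    split
    · simp
    · exact le_trans ih (by push_cast; omega)

lemma pv_rfind_le (s sub : List Char) : PySem.Chars.rfind s sub ≤ (s.length : Int) := by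
  simpa [PySem.Chars.rfind] using pv_rfind_go_le s sub s.length

-- A's relative bounded rfind, inside the loop, is rfind on the first `limit` chars of the remainder.
lemma pv_rfindFrom_rel (rem sub : List Char) (limit : Int) (h1 : 1 ≤ limit)
    (hgt : limit < (rem.length : Int)) :
    PySem.Chars.rfindFrom rem sub 0 (some limit) =
      PySem.Chars.rfind (List.take limit.toNat rem) sub := by
  simp only [PySem.Chars.rfindFrom]
  rw [if_neg (show ¬((rem.length:Int) < limit) by omega),
      if_neg (show ¬(limit < (0:Int)) by omega)]
  simp only [if_neg (show ¬((0:Int) < 0) by omega)]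
  rw [if_neg (show ¬(limit < (0:Int)) by omega)]
  simp only [Int.toNat_zero, List.drop_zero]
  split <;> omega

-- B's absolute bounded rfind is the same rfind, shifted by i (with -1 preserved).
lemma pv_rfindFrom_abs (cs sub : List Char) (i : Nat) (limit : Int) (h1 : 1 ≤ limit)
    (hlt : (i : Int) + limit < (cs.length : Int)) :
    PySem.Chars.rfindFrom cs sub (i : Int) (some ((i : Int) + limit)) =
      (if PySem.Chars.rfind (List.take limit.toNat (cs.drop i)) sub = -1 then -1
       else (i : Int) + PySem.Chars.rfind (List.take limit.toNat (cs.drop i)) sub) := by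
  simp only [PySem.Chars.rfindFrom]
  rw [if_neg (show ¬((cs.length:Int) < (i:Int) + limit) by omega),
      if_neg (show ¬((i:Int) + limit < 0) by omega),
      if_neg (show ¬((i:Int) < 0) by omega),
      if_neg (show ¬((i:Int) + limit < (i:Int)) by omega)]
  have h2 : ((i:Int) + limit).toNat = i + limit.toNat := by omega
  have h3 : ((i:Int)).toNat = i := by omega
  rw [h2, h3]
  have h4 : (cs.take (i + limit.toNat)).drop i = (cs.drop i).take limit.toNat :=
    Eq.symm List.take_drop
  rw [h4]

lemma pv_rstrip_append_singleton (l : List Char) (c : Char) :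
    PySem.Chars.rstrip (l ++ [c]) = if PySem.Chars.isspace c then PySem.Chars.rstrip l else l ++ [c] := by
  simp [PySem.Chars.rstrip, List.dropWhile_cons]
  split <;> simp_all

lemma pv_trimEnd_bounds (cs : List Char) (i : Nat) (e : Nat) (he : i ≤ e) :
    i ≤ pvTrimEnd cs i e ∧ pvTrimEnd cs i e ≤ e := by
  induction e using Nat.strong_induction_on with
  | _ e ih =>
    rw [pvTrimEnd]
    split
    · rename_i h
      have := ih (e-1) (by omega) (by omega)
      omega
    · omega

-- B's backward whitespace scan computes exactly rstrip of the chunk.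
lemma pv_trimEnd_rstrip (cs : List Char) (i : Nat) (e : Nat) (he : i ≤ e) (hlen : e ≤ cs.length) :
    List.take (pvTrimEnd cs i e - i) (List.drop i cs) =
      PySem.Chars.rstrip (List.take (e - i) (List.drop i cs)) := by
  induction e using Nat.strong_induction_on with
  | _ e ih =>
    rw [pvTrimEnd]
    split
    · rename_i h
      obtain ⟨hie, hsp⟩ := h
      have hgl : (cs[e-1]?).getD 'x' = (cs.drop i)[e-1-i]'(by simp; omega) := by
        have : cs[e-1]? = some (cs[e-1]'(by omega)) := List.getElem?_eq_getElem (by omega)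
        rw [this]
        simp
        congr 1
        omega
      have hstep : List.take (e - i) (List.drop i cs)
          = List.take (e - 1 - i) (List.drop i cs) ++ [(cs.drop i)[e-1-i]'(by simp; omega)] := by
        have h5 : e - i = (e - 1 - i) + 1 := by omega
        rw [h5]
        exact List.take_succ_eq_append_getElem (by simp; omega)
      rw [hstep, pv_rstrip_append_singleton, if_pos (by rw [← hgl]; exact hsp)]
      exact ih (e-1) (by omega) (by omega) (by omega)
    · rename_i h
      rcases Nat.eq_or_lt_of_le he with heq | hlt
      · subst heq; simp [PySem.Chars.rstrip]
      · have hns : ¬ PySem.Chars.isspace ((cs[e-1]?).getD 'x') := by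
          intro hc; exact h ⟨hlt, hc⟩
        have hgl : (cs[e-1]?).getD 'x' = (cs.drop i)[e-1-i]'(by simp; omega) := by
          have : cs[e-1]? = some (cs[e-1]'(by omega)) := List.getElem?_eq_getElem (by omega)
          rw [this]; simp; congr 1; omega
        have hstep : List.take (e - i) (List.drop i cs)
            = List.take (e - 1 - i) (List.drop i cs) ++ [(cs.drop i)[e-1-i]'(by simp; omega)] := by
          have h5 : e - i = (e - 1 - i) + 1 := by omega
          rw [h5]
          exact List.take_succ_eq_append_getElem (by simp; omega)
        rw [hstep, pv_rstrip_append_singleton, if_neg (by rw [← hgl]; exact hns)]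

-- B's forward whitespace scan computes exactly lstrip of the remainder.
lemma pv_skipWS_spec (cs : List Char) (i : Nat) (hi : i ≤ cs.length) :
    List.drop (pvSkipWS cs i) cs = PySem.Chars.lstrip (List.drop i cs) ∧
      i ≤ pvSkipWS cs i ∧ pvSkipWS cs i ≤ cs.length := by
  obtain ⟨k, hk⟩ : ∃ k, cs.length - i = k := ⟨_, rfl⟩
  induction k generalizing i with
  | zero =>
    have : i = cs.length := by omega
    subst this
    rw [pvSkipWS, dif_neg (by omega)]
    simp [PySem.Chars.lstrip]
  | succ k ih =>
    have hlt : i < cs.length := by omega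
    have hdrop : List.drop i cs = cs[i] :: List.drop (i+1) cs := List.drop_eq_getElem_cons hlt
    rw [pvSkipWS, dif_pos hlt]
    by_cases hsp : PySem.Chars.isspace cs[i]
    · rw [if_pos hsp]
      have hrec := ih (i+1) (by omega) (by omega)
      refine ⟨?_, by omega, hrec.2.2⟩
      rw [hrec.1, PySem.Chars.lstrip, PySem.Chars.lstrip, hdrop, List.dropWhile_cons, if_pos hsp]
    · rw [if_neg hsp]
      refine ⟨?_, le_refl _, hi⟩
      conv_rhs => rw [PySem.Chars.lstrip, hdrop, List.dropWhile_cons, if_neg hsp]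
      rw [← hdrop]

-- One loop iteration: A's slice-rstrip-lstrip step equals B's pointer step for the same cut.
lemma pv_step (cs : List Char) (limit cut : Int) (i : Nat) (parts : List (List Char)) (fuel : Nat)
    (_hi : i ≤ cs.length) (h1cut : 1 ≤ cut) (hle : (i : Int) + cut ≤ (cs.length : Int))
    (ih : ∀ (i : Nat) (parts : List (List Char)), i ≤ cs.length →
      pvALoop limit fuel (cs.drop i) parts =
        ((pvBLoop cs limit fuel i parts).1, cs.drop (pvBLoop cs limit fuel i parts).2)) :
    pvALoop limit fuel (PySem.Chars.lstrip (PySem.List.slice (cs.drop i) (some cut) none))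
        (parts ++ [PySem.Chars.rstrip (PySem.List.slice (cs.drop i) none (some cut))])
      = ((pvBLoop cs limit fuel (pvSkipWS cs ((i : Int) + cut).toNat)
            (parts ++ [PySem.List.slice cs (some (i : Int))
              (some ((pvTrimEnd cs i ((i : Int) + cut).toNat : Nat) : Int))])).1,
         cs.drop (pvBLoop cs limit fuel (pvSkipWS cs ((i : Int) + cut).toNat)
            (parts ++ [PySem.List.slice cs (some (i : Int))
              (some ((pvTrimEnd cs i ((i : Int) + cut).toNat : Nat) : Int))])).2) := by
  set j : Nat := ((i : Int) + cut).toNat with hj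
  have hij : (j : Int) = (i : Int) + cut := by omega
  have hij1 : i ≤ j := by omega
  have hjlen : j ≤ cs.length := by omega
  have hcutt : cut.toNat = j - i := by omega
  have htb := pv_trimEnd_bounds cs i j hij1
  -- the appended parts are equal
  have hpart : PySem.Chars.rstrip (PySem.List.slice (cs.drop i) none (some cut))
      = PySem.List.slice cs (some (i : Int)) (some ((pvTrimEnd cs i j : Nat) : Int)) := by
    rw [PySem.List.slice_to _ (by omega), hcutt, PySem.List.slice_natCast,
        ← pv_trimEnd_rstrip cs i j hij1 hjlen]
  -- the new remainder is the drop at the advanced pointer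
  have hrem : PySem.Chars.lstrip (PySem.List.slice (cs.drop i) (some cut) none)
      = cs.drop (pvSkipWS cs j) := by
    rw [PySem.List.slice_from _ (by omega), hcutt, List.drop_drop,
        (show i + (j - i) = j by omega), (pv_skipWS_spec cs j hjlen).1]
  rw [hpart, hrem]
  exact ih (pvSkipWS cs j) _ (pv_skipWS_spec cs j hjlen).2.2

-- The two loops agree: A's remainder is always the suffix of the text at B's pointer.
lemma pv_loop_eq (cs : List Char) (limit : Int) (h1 : 1 ≤ limit) :
    ∀ (fuel : Nat) (i : Nat) (parts : List (List Char)), i ≤ cs.length →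
      pvALoop limit fuel (cs.drop i) parts =
        ((pvBLoop cs limit fuel i parts).1, cs.drop (pvBLoop cs limit fuel i parts).2) := by
  intro fuel
  induction fuel with
  | zero => intro i parts hi; simp [pvALoop, pvBLoop]
  | succ fuel ih =>
    intro i parts hi
    have hlen : ((cs.drop i).length : Int) = (cs.length : Int) - i := by
      simp [List.length_drop]; omega
    rw [pvALoop, pvBLoop]
    by_cases hc : (cs.length : Int) - (i : Int) > limit
    · rw [if_pos (by rw [hlen]; exact hc), if_pos hc]
      have hgt : limit < ((cs.drop i).length : Int) := by omega
      have habs : ((i : Int)) + limit < (cs.length : Int) := by omega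
      simp only [pv_rfindFrom_rel _ _ _ h1 hgt, pv_rfindFrom_abs _ _ _ _ h1 habs]
      set L := List.take limit.toNat (cs.drop i) with hLdef
      have hLlen : (L.length : Int) ≤ limit := by
        simp [hLdef, List.length_take]; omega
      set r2 := PySem.Chars.rfind L ['\n', '\n'] with hr2def
      set r1 := PySem.Chars.rfind L ['\n'] with hr1def
      have hr2le : r2 ≤ limit := le_trans (pv_rfind_le L _) hLlen
      have hr1le : r1 ≤ limit := le_trans (pv_rfind_le L _) hLlen
      by_cases h0 : r2 = -1 ∨ r2 < 800
      · rw [if_pos h0,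
            if_pos (show (if r2 = -1 then -1 else (i:Int) + r2) = -1 ∨
                (if r2 = -1 then -1 else (i:Int) + r2) - i < 800 by split_ifs <;> omega)]
        by_cases h0' : r1 = -1 ∨ r1 < 800
        · rw [if_pos h0',
              if_pos (show (if r1 = -1 then -1 else (i:Int) + r1) = -1 ∨
                  (if r1 = -1 then -1 else (i:Int) + r1) - i < 800 by split_ifs <;> omega)]
          exact pv_step cs limit limit i parts fuel hi h1 (by omega) ih
        · have hr1 : ¬ r1 = -1 ∧ ¬ r1 < 800 := by tauto
          rw [if_neg h0', if_neg (show ¬ ((if r1 = -1 then -1 else (i:Int) + r1) = -1 ∨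
                (if r1 = -1 then -1 else (i:Int) + r1) - i < 800) by
              rw [if_neg hr1.1]; omega),
            if_neg hr1.1]
          exact pv_step cs limit r1 i parts fuel hi (by omega) (by omega) ih
      · have hr2 : ¬ r2 = -1 ∧ ¬ r2 < 800 := by tauto
        rw [if_neg h0, if_neg (show ¬ ((if r2 = -1 then -1 else (i:Int) + r2) = -1 ∨
              (if r2 = -1 then -1 else (i:Int) + r2) - i < 800) by
            rw [if_neg hr2.1]; omega),
          if_neg (show ¬ (r2 = -1 ∨ r2 < 800) by tauto),
          if_neg hr2.1,
          if_neg (show ¬ ((i:Int) + r2 = -1 ∨ (i:Int) + r2 - i < 800) by omega)]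
        exact pv_step cs limit r2 i parts fuel hi (by omega) (by omega) ih
    · rw [if_neg (by rw [hlen]; exact hc), if_neg hc]

-- ===== VERDICT (by name: the statement is the Claim_ definition above) =====
theorem split_telegram_chunks_spec : Claim_equal_split_telegram_chunks := by
  intro text limit _hdom hpre
  unfold Spec_split_telegram_chunks
  unfold split_telegram_chunks split_telegram_chunks_alt
  have h1 : (1 : Int) ≤ limit := hpre
  by_cases h : ((text.toList.length : Int)) ≤ limit
  · simp only [if_pos h]
  · simp only [if_neg h]
    have hA : pvALoop limit (text.toList.length + 1) text.toList []
        = ((pvBLoop text.toList limit (text.toList.length + 1) 0 []).1,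
           text.toList.drop (pvBLoop text.toList limit (text.toList.length + 1) 0 []).2) := by
      have := pv_loop_eq text.toList limit h1 (text.toList.length + 1) 0 [] (by omega)
      simpa using this
    rw [hA]
    set k := (pvBLoop text.toList limit (text.toList.length + 1) 0 []).2 with hk
    by_cases hend : k < text.toList.length
    · rw [if_pos hend,
          if_neg (show ¬ (text.toList.drop k).isEmpty = true by
            simp only [List.isEmpty_iff, List.drop_eq_nil_iff]; omega),
          PySem.List.slice_from _ (show (0:Int) ≤ (k:Int) by omega)]
      simp
    · rw [if_neg hend,
          if_pos (show (text.toList.drop k).isEmpty = true by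
            simp only [List.isEmpty_iff, List.drop_eq_nil_iff]; omega)]
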